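-- pv_equiv track=rewrite | github.com/AgasiArgent/kvota-onestack | tests/test_deal_visibility_fix.py | _find_deals_select_blocks
-- ===== SOURCE A (Python) =====
-- def _find_deals_select_blocks(content):
--     """
--     Find all supabase.table("deals").select(...) blocks that span
--     potentially multiple lines. Returns list of (start_line, select_string) tuples.
--
--     We need to extract the full select string (which may span multiple lines)
--     for each deals query that joins specifications or quotes.
--     """
--     blocks = []
--     lines = content.split("\n")
--     i = 0
--     while i < len(lines):
--         line = lines[i]
--         if 'table("deals").select(' in line:
--             # Collect the full select() call (may span multiple lines)
--             select_str = line
--             paren_depth = line.count("(") - line.count(")")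
--             start_line = i + 1  # 1-indexed
--             j = i + 1
--             while paren_depth > 0 and j < len(lines):
--                 select_str += "\n" + lines[j]
--                 paren_depth += lines[j].count("(") - lines[j].count(")")
--                 j += 1
--             blocks.append((start_line, select_str))
--             i = j
--         else:
--             i += 1
--     return blocks
-- ===== SOURCE B (Python) =====
-- def _find_deals_select_blocks(content):
--     """Flat single-pass state machine over enumerate(lines) instead of
--     nested index-driven while loops."""
--     blocks = []
--     in_block = False
--     start_line = 0
--     select_str = ""
--     depth = 0
--     for idx, line in enumerate(content.split("\n")):
--         if in_block:
--             select_str += "\n" + line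
--             depth += line.count("(") - line.count(")")
--             if depth <= 0:
--                 blocks.append((start_line, select_str))
--                 in_block = False
--         elif 'table("deals").select(' in line:
--             start_line = idx + 1
--             select_str = line
--             depth = line.count("(") - line.count(")")
--             if depth <= 0:
--                 blocks.append((start_line, select_str))
--             else:
--                 in_block = True
--     if in_block:
--         blocks.append((start_line, select_str))
--     return blocks
-- ===== Notes on version B (the rewrite author's own statement) =====
-- stated objective: simpler
-- what changed: Replaced A's nested index-driven while loops (outer scan plus an inner line-consuming loop with manual index jumping) by one flat pass over enumerate(lines) driven by an in_block/paren_depth state machine with a final flush.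
import Mathlib
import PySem

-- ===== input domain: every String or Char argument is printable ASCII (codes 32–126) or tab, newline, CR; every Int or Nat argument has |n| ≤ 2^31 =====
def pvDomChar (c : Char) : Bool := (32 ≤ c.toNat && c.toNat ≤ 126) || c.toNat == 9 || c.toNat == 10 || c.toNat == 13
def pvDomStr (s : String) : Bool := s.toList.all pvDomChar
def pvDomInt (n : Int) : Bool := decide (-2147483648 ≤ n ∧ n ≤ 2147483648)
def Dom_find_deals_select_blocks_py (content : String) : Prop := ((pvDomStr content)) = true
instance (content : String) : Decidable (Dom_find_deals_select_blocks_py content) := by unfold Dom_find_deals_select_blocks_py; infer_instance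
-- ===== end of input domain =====

-- B replaces A's nested index-driven while loops by a single flat state-machine
-- pass over enumerate(lines); objective: simpler/alternative decomposition, same cost.

-- ===== PORT A =====
-- the marker substring 'table("deals").select('
def pvMarker : String := "table(\"deals\").select("

-- line.count("(") - line.count(")")
def pvCnt (line : String) : Int :=
  (PySem.Str.count line "(" : Int) - (PySem.Str.count line ")" : Int)

-- A's inner while loop: consumes lines while paren_depth > 0; returns
-- (select_str, remaining lines, number of lines consumed)
def innerA (rest : List String) (sel : String) (depth : Int) : String × List String × Nat :=
  if 0 < depth then
    match rest with
    | [] => (sel, [], 0)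
    | l :: rs =>
      let r := innerA rs (sel ++ "\n" ++ l) (depth + pvCnt l)
      (r.1, r.2.1, r.2.2 + 1)
  else (sel, rest, 0)

-- needed by outerA's termination proof
theorem innerA_length (rest : List String) (sel : String) (depth : Int) :
    (innerA rest sel depth).2.1.length ≤ rest.length := by
  induction rest generalizing sel depth with
  | nil => rw [innerA]; split <;> simp
  | cons l rs ih =>
    rw [innerA]
    split
    · simpa using Nat.le_trans (ih _ _) (Nat.le_succ _)
    · simp

-- A's outer while loop over the remaining lines, i the 0-based index of the head
def outerA (lines : List String) (i : Nat) (acc : List (Int × String)) :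
    List (Int × String) :=
  match lines with
  | [] => acc
  | line :: rest =>
    if PySem.Str.isIn pvMarker line then
      let r := innerA rest line (pvCnt line)
      outerA r.2.1 (i + 1 + r.2.2) (acc ++ [((i : Int) + 1, r.1)])
    else outerA rest (i + 1) acc
termination_by lines.length
decreasing_by
  · have h := innerA_length rest line (pvCnt line)
    simp only [List.length_cons]; omega
  · simp

def find_deals_select_blocks_py (content : String) : List (Int × String) :=
  outerA ((PySem.Str.split? content "\n").getD []) 0 []

-- ===== PORT B =====
-- the state of Source B's flat pass: blocks, in_block, start_line, select_str, depth
structure BSt where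
  blocks : List (Int × String)
  inBlock : Bool
  startLine : Int
  sel : String
  depth : Int

-- one iteration of Source B's for-loop body; p = (idx, line)
def bStep (st : BSt) (p : Int × String) : BSt :=
  if st.inBlock then
    let sel := st.sel ++ "\n" ++ p.2
    let depth := st.depth + pvCnt p.2
    if depth ≤ 0 then
      { st with blocks := st.blocks ++ [(st.startLine, sel)], inBlock := false,
                sel := sel, depth := depth }
    else { st with sel := sel, depth := depth }
  else if PySem.Str.isIn pvMarker p.2 then
    if pvCnt p.2 ≤ 0 then
      { st with blocks := st.blocks ++ [(p.1 + 1, p.2)], startLine := p.1 + 1,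
                sel := p.2, depth := pvCnt p.2 }
    else { st with inBlock := true, startLine := p.1 + 1, sel := p.2,
                   depth := pvCnt p.2 }
  else st

-- Source B's final flush of a still-open block
def bFinish (st : BSt) : List (Int × String) :=
  if st.inBlock then st.blocks ++ [(st.startLine, st.sel)] else st.blocks

def find_deals_select_blocks_py_alt (content : String) : List (Int × String) :=
  bFinish ((PySem.List.enumerate ((PySem.Str.split? content "\n").getD [])).foldl
    bStep ⟨[], false, 0, "", 0⟩)

-- ===== PRECONDITION & SPEC =====
def Spec_find_deals_select_blocks_py (content : String) (out : List (Int × String)) : Prop := out = find_deals_select_blocks_py_alt content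
instance (content : String) (out : List (Int × String)) : Decidable (Spec_find_deals_select_blocks_py content out) := by unfold Spec_find_deals_select_blocks_py; infer_instance

-- ===== CLAIM (what is proved, stated in full; the proofs are below) =====
def Claim_equal_find_deals_select_blocks_py : Prop := ∀ (content : String), Dom_find_deals_select_blocks_py content → Spec_find_deals_select_blocks_py content (find_deals_select_blocks_py content)

-- ===== LEMMAS AND PROOFS =====

-- when not in a block, the leftover startLine/sel/depth fields are dead state
theorem bFinish_foldl_irrel (l : List (Int × String)) (acc : List (Int × String))
    (s1 s2 : Int) (sel1 sel2 : String) (d1 d2 : Int) :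
    bFinish (l.foldl bStep ⟨acc, false, s1, sel1, d1⟩)
      = bFinish (l.foldl bStep ⟨acc, false, s2, sel2, d2⟩) := by
  induction l generalizing acc s1 s2 sel1 sel2 d1 d2 with
  | nil => simp [bFinish]
  | cons p l ih =>
    simp only [List.foldl_cons, bStep]
    split
    · next h => simp at h
    · split
      · split
        · exact ih _ _ _ _ _ _ _
        · simp
      · exact ih _ _ _ _ _ _ _

theorem innerA_nonpos (rest : List String) (sel : String) (depth : Int)
    (h : ¬ 0 < depth) : innerA rest sel depth = (sel, rest, 0) := by
  rw [innerA.eq_def]; simp [h]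

theorem innerA_cons_pos (l : String) (rs : List String) (sel : String) (depth : Int)
    (h : 0 < depth) :
    innerA (l :: rs) sel depth
      = ((innerA rs (sel ++ "\n" ++ l) (depth + pvCnt l)).1,
         (innerA rs (sel ++ "\n" ++ l) (depth + pvCnt l)).2.1,
         (innerA rs (sel ++ "\n" ++ l) (depth + pvCnt l)).2.2 + 1) := by
  rw [innerA.eq_def]; simp [h]

-- the in-block run of B computes exactly A's inner while loop
theorem bFoldl_inner (rest : List String) (sel : String) (depth : Int)
    (k : Int) (acc : List (Int × String)) (start : Int) (hd : 0 < depth) :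
    bFinish ((PySem.List.enumerate rest k).foldl bStep ⟨acc, true, start, sel, depth⟩)
      = bFinish ((PySem.List.enumerate (innerA rest sel depth).2.1
            (k + (innerA rest sel depth).2.2)).foldl bStep
          ⟨acc ++ [(start, (innerA rest sel depth).1)], false, 0, "", 0⟩) := by
  induction rest generalizing sel depth k acc with
  | nil =>
    rw [innerA]
    simp only [hd, if_pos, PySem.List.enumerate_nil, List.foldl_nil]
    simp [bFinish]
  | cons l rs ih =>
    rw [innerA_cons_pos _ _ _ _ hd]
    by_cases hc : depth + pvCnt l ≤ 0
    · -- block closes on line l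
      have hnp : ¬ 0 < depth + pvCnt l := by omega
      rw [innerA_nonpos _ _ _ hnp]
      simp only [PySem.List.enumerate_cons, List.foldl_cons]
      have hstep : bStep ⟨acc, true, start, sel, depth⟩ (k, l)
          = ⟨acc ++ [(start, sel ++ "\n" ++ l)], false, start, sel ++ "\n" ++ l,
             depth + pvCnt l⟩ := by
        simp [bStep, hc]
      rw [hstep]
      have : k + ((0 : Nat) + 1 : Nat) = k + 1 := by push_cast; ring
      rw [this]
      exact bFinish_foldl_irrel _ _ _ _ _ _ _ _
    · -- still open, recurse
      have hp : 0 < depth + pvCnt l := by omega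
      have hstep : bStep ⟨acc, true, start, sel, depth⟩ (k, l)
          = ⟨acc, true, start, sel ++ "\n" ++ l, depth + pvCnt l⟩ := by
        simp [bStep, hc]
      simp only [PySem.List.enumerate_cons, List.foldl_cons, hstep]
      rw [ih (sel ++ "\n" ++ l) (depth + pvCnt l) (k + 1) acc hp]
      have : k + ((innerA rs (sel ++ "\n" ++ l) (depth + pvCnt l)).2.2 + 1 : Nat)
          = k + 1 + (innerA rs (sel ++ "\n" ++ l) (depth + pvCnt l)).2.2 := by
        push_cast; ring
      rw [this]

-- main loop correspondence, by strong induction on the number of lines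
theorem outerA_eq_fold (n : Nat) :
    ∀ (lines : List String), lines.length ≤ n → ∀ (i : Nat) (acc : List (Int × String)),
    outerA lines i acc
      = bFinish ((PySem.List.enumerate lines (i : Int)).foldl bStep
          ⟨acc, false, 0, "", 0⟩) := by
  induction n with
  | zero =>
    intro lines hl i acc
    have : lines = [] := List.length_eq_zero_iff.mp (Nat.le_zero.mp hl)
    subst this
    simp [outerA, PySem.List.enumerate_nil, bFinish]
  | succ m ih =>
    intro lines hl i acc
    match lines with
    | [] => simp [outerA, PySem.List.enumerate_nil, bFinish]
    | line :: rest =>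
      have hr : rest.length ≤ m := by simpa using Nat.lt_succ_iff.mp (Nat.lt_of_lt_of_le (by simp) hl)
      rw [outerA]
      simp only [PySem.List.enumerate_cons, List.foldl_cons]
      by_cases hm : PySem.Str.isIn pvMarker line
      · have hm' : PySem.Chars.isIn pvMarker.toList line.toList = true := by
          simpa using hm
        simp only [hm, if_pos]
        by_cases hd : 0 < pvCnt line
        · -- multi-line block: B enters in_block state
          have hd2 : ¬ pvCnt line ≤ 0 := by omega
          have hstep : bStep ⟨acc, false, 0, "", 0⟩ ((i : Int), line)
              = ⟨acc, true, (i : Int) + 1, line, pvCnt line⟩ := by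
            simp [bStep, hm', hd2]
          rw [hstep, bFoldl_inner rest line (pvCnt line) ((i : Int) + 1) acc ((i : Int) + 1) hd]
          have hlen : (innerA rest line (pvCnt line)).2.1.length ≤ m :=
            Nat.le_trans (innerA_length _ _ _) hr
          rw [ih _ hlen (i + 1 + (innerA rest line (pvCnt line)).2.2)
                (acc ++ [((i : Int) + 1, (innerA rest line (pvCnt line)).1)])]
          have : ((i + 1 + (innerA rest line (pvCnt line)).2.2 : Nat) : Int)
              = (i : Int) + 1 + (innerA rest line (pvCnt line)).2.2 := by push_cast; ring
          rw [this]
        · -- single-line block: depth already ≤ 0, B emits immediately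
          have hd' : pvCnt line ≤ 0 := by omega
          have heq : innerA rest line (pvCnt line) = (line, rest, 0) :=
            innerA_nonpos _ _ _ hd
          have hstep : bStep ⟨acc, false, 0, "", 0⟩ ((i : Int), line)
              = ⟨acc ++ [((i : Int) + 1, line)], false, (i : Int) + 1, line, pvCnt line⟩ := by
            simp [bStep, hm', hd']
          rw [hstep, heq]
          have hlen : rest.length ≤ m := hr
          rw [bFinish_foldl_irrel _ _ ((i : Int) + 1) 0 line "" (pvCnt line) 0]
          rw [ih rest hlen (i + 1 + 0) (acc ++ [((i : Int) + 1, line)])]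
          have : ((i + 1 + 0 : Nat) : Int) = (i : Int) + 1 := by push_cast; ring
          rw [this]
      · have hm' : PySem.Chars.isIn pvMarker.toList line.toList = false := by
          simpa using hm
        simp only [hm, if_neg, Bool.false_eq_true, not_false_iff]
        have hstep : bStep ⟨acc, false, 0, "", 0⟩ ((i : Int), line) = ⟨acc, false, 0, "", 0⟩ := by
          simp [bStep, hm']
        rw [hstep, ih rest hr (i + 1) acc]
        have : ((i + 1 : Nat) : Int) = (i : Int) + 1 := by push_cast; ring
        rw [this]

-- ===== VERDICT (by name: the statement is the Claim_ definition above) =====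
theorem find_deals_select_blocks_py_spec : Claim_equal_find_deals_select_blocks_py := by
  intro content _
  unfold Spec_find_deals_select_blocks_py find_deals_select_blocks_py
    find_deals_select_blocks_py_alt
  have h := outerA_eq_fold ((PySem.Str.split? content "\n").getD []).length
    ((PySem.Str.split? content "\n").getD []) (Nat.le_refl _) 0 []
  simpa using h
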